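-- pv_equiv track=rewrite | github.com/MER-GROUP/COURSES | ARCHIVE/Python. Поколение Python - контесты по программированию/Contest-002/practice_2_v2.py | key_difference2
-- ===== SOURCE A (Python) =====
-- def key_difference2(dict1, dict2):
--     s=list({**dict1, **dict2}.keys())
--     dict3={}
--     for i in s:
--         if dict1.get(i)==None:
--             dict3[i]='added'
--         elif dict2.get(i)==None:
--             dict3[i]='deleted'
--         else:
--             dict3[i]=['changed','equal'][dict1.get(i)==dict2.get(i)]
--
--     return dict3
-- ===== SOURCE B (Python) =====
-- def key_difference2(dict1, dict2):
--     # Staged overwrites: start with every merged key labelled 'added', then overwrite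
--     # dict1's keys with 'deleted', then overwrite the common keys with 'equal'/'changed'.
--     res = dict.fromkeys({**dict1, **dict2}, 'added')
--     res.update(dict.fromkeys(dict1, 'deleted'))
--     res.update({k: 'equal' if dict1[k] == dict2[k] else 'changed'
--                 for k in dict1 if k in dict2})
--     return res
-- ===== Notes on version B (the rewrite author's own statement) =====
-- stated objective: alternative
-- what changed: B replaces A's per-key three-way branch loop by three staged overwriting passes: first every merged key is labelled 'added' with dict.fromkeys, then dict1's keys are overwritten to 'deleted', then the common keys are overwritten to 'equal'/'changed'; overwrites keep insertion position, so the same dict in the same order results.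
import Mathlib
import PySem

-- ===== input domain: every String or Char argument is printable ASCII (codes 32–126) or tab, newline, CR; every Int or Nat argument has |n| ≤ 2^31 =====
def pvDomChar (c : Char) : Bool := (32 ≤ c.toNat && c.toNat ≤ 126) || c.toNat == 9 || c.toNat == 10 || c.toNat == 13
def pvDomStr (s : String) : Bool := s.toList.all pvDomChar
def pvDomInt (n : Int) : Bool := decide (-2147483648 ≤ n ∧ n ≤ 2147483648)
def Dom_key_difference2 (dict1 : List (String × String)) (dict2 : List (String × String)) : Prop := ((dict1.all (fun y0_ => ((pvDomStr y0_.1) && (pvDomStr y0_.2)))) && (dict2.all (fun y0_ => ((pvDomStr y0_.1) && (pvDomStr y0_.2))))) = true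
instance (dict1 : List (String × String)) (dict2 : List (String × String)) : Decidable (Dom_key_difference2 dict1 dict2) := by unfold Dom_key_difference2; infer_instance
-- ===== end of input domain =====

-- B replaces A's per-key three-way branch loop by three staged overwriting passes
-- (all keys 'added', then dict1's keys 'deleted', then common keys 'equal'/'changed'): alternative decomposition, same cost.


-- ===== PORT A =====
def key_difference2 (dict1 : List (String × String)) (dict2 : List (String × String)) : List (String × String) :=
  -- the dict parameters arrive as their insertion-order association lists, wrapped as dicts
  let d1 : PySem.Dict String String := PySem.Dict.mk dict1
  let d2 : PySem.Dict String String := PySem.Dict.mk dict2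
  -- s = list({**dict1, **dict2}.keys())
  let s := ((dict1 ++ dict2).foldl (fun d p => d.insert p.1 p.2)
             (PySem.Dict.empty : PySem.Dict String String)).keys
  let dict3 := s.foldl (fun d3 i =>
      if (d1.get? i).isNone then d3.insert i "added"          -- dict1.get(i)==None
      else if (d2.get? i).isNone then d3.insert i "deleted"   -- dict2.get(i)==None
      -- ['changed','equal'][dict1.get(i)==dict2.get(i)] : index 1 ('equal') iff the comparison holds
      else d3.insert i (if d1.get? i == d2.get? i then "equal" else "changed"))
    (PySem.Dict.empty : PySem.Dict String String)
  dict3.items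

-- ===== PORT B =====
def key_difference2_alt (dict1 : List (String × String)) (dict2 : List (String × String)) : List (String × String) :=
  let d1 : PySem.Dict String String := PySem.Dict.mk dict1
  let d2 : PySem.Dict String String := PySem.Dict.mk dict2
  -- {**dict1, **dict2}
  let merged := (dict1 ++ dict2).foldl (fun d p => d.insert p.1 p.2)
                  (PySem.Dict.empty : PySem.Dict String String)
  -- res = dict.fromkeys({**dict1, **dict2}, 'added')
  let res0 := merged.keys.foldl (fun d k => d.insert k "added")
                (PySem.Dict.empty : PySem.Dict String String)
  -- res.update(dict.fromkeys(dict1, 'deleted'))  — overwrite keeps position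
  let res1 := dict1.foldl (fun d p => d.insert p.1 "deleted") res0
  -- res.update({k: 'equal' if dict1[k] == dict2[k] else 'changed' for k in dict1 if k in dict2})
  -- dict1[k] / dict2[k] never raise here: the key is in both dicts, so get? is some on both sides
  let res2 := (dict1.filter (fun p => d2.contains p.1)).foldl
      (fun d p => d.insert p.1 (if d1.get? p.1 == d2.get? p.1 then "equal" else "changed")) res1
  res2.items

-- ===== PRECONDITION & SPEC =====
-- Pre_ requires each association list to have pairwise-distinct keys: the Python arguments are
-- dicts, which cannot carry duplicate keys, so a duplicate-keyed list represents no Python input.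
def Pre_key_difference2 (dict1 : List (String × String)) (dict2 : List (String × String)) : Prop :=
  (dict1.map (fun p => p.1)).Nodup ∧ (dict2.map (fun p => p.1)).Nodup
instance (dict1 : List (String × String)) (dict2 : List (String × String)) : Decidable (Pre_key_difference2 dict1 dict2) := by unfold Pre_key_difference2; infer_instance
def pvWitness_key_difference2 : (List (String × String)) × (List (String × String)) :=
  ([("a", "1"), ("b", "2")], [("b", "3"), ("c", "2")])
def Spec_key_difference2 (dict1 : List (String × String)) (dict2 : List (String × String)) (out : List (String × String)) : Prop := out = key_difference2_alt dict1 dict2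
instance (dict1 : List (String × String)) (dict2 : List (String × String)) (out : List (String × String)) : Decidable (Spec_key_difference2 dict1 dict2 out) := by unfold Spec_key_difference2; infer_instance

-- ===== CLAIM (what is proved, stated in full; the proofs are below) =====
def Claim_equal_key_difference2 : Prop := ∀ (dict1 : List (String × String)) (dict2 : List (String × String)), Dom_key_difference2 dict1 dict2 → Pre_key_difference2 dict1 dict2 → Spec_key_difference2 dict1 dict2 (key_difference2 dict1 dict2)

-- ===== LEMMAS AND PROOFS =====

-- a fold of inserts whose values depend only on the key: getD is f k when some pair keyed k
-- occurs in the list, and the original getD otherwise (no Nodup needed: every overwrite writes f k)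
theorem getD_foldl_insert_keyfun (f : String → String) (xs : List (String × String))
    (d : PySem.Dict String String) (k : String) :
    ((xs.foldl (fun d p => d.insert p.1 (f p.1)) d).getD k "")
      = if k ∈ xs.map (fun p => p.1) then f k else d.getD k "" := by
  induction xs generalizing d with
  | nil => simp
  | cons p xs ih =>
    simp only [List.foldl_cons, List.map_cons, List.mem_cons]
    rw [ih]
    by_cases hx : k ∈ xs.map (fun p => p.1)
    · simp [hx]
    · by_cases hk : k = p.1
      · subst hk; simp [hx, PySem.Dict.getD_insert_self]
      · simp [hx, hk, PySem.Dict.getD_insert]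

-- ===== VERDICT (by name: the statement is the Claim_ definition above) =====
theorem key_difference2_spec : Claim_equal_key_difference2 := by
  intro dict1 dict2 _ hpre
  obtain ⟨h1, h2⟩ := hpre
  unfold Spec_key_difference2 key_difference2 key_difference2_alt
  dsimp only
  set d1 : PySem.Dict String String := PySem.Dict.mk dict1 with hd1
  set d2 : PySem.Dict String String := PySem.Dict.mk dict2 with hd2
  set merged := (dict1 ++ dict2).foldl (fun d p => d.insert p.1 p.2)
      (PySem.Dict.empty : PySem.Dict String String) with hmerged
  -- the classifier A applies to each merged key
  set classify : String → String := fun i =>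
    if (d1.get? i).isNone then "added"
    else if (d2.get? i).isNone then "deleted"
    else if d1.get? i == d2.get? i then "equal" else "changed" with hcl
  have hbody : (fun (d3 : PySem.Dict String String) (i : String) =>
      if (d1.get? i).isNone then d3.insert i "added"
      else if (d2.get? i).isNone then d3.insert i "deleted"
      else d3.insert i (if d1.get? i == d2.get? i then "equal" else "changed"))
      = fun d3 i => d3.insert i (classify i) := by
    funext d3 i
    simp only [hcl]
    split_ifs <;> rfl
  -- merged keys: no duplicates, and membership = membership in either dict
  have hndm : merged.keys.Nodup := by
    rw [hmerged]
    exact PySem.Dict.nodup_keys_foldl_insert_key (l := dict1 ++ dict2)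
      (key := fun p => p.1) (f := fun _ p => p.2) (d := PySem.Dict.empty)
      PySem.Dict.nodup_keys_empty
  have hmemm : ∀ k, k ∈ merged.keys ↔ (k ∈ dict1.map (fun p => p.1) ∨ k ∈ dict2.map (fun p => p.1)) := by
    intro k
    rw [hmerged, PySem.Dict.keys_foldl_insert_key, PySem.Dict.keys_empty,
      PySem.Set.update_nil_left, PySem.Set.mem_ofList]
    simp
  -- membership in a dict mk'ed from a list
  have hc1 : ∀ k, d1.contains k = true ↔ k ∈ dict1.map (fun p => p.1) := by
    intro k; rw [PySem.Dict.contains_iff_mem_keys, hd1, PySem.Dict.keys_mk]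
  have hc2 : ∀ k, d2.contains k = true ↔ k ∈ dict2.map (fun p => p.1) := by
    intro k; rw [PySem.Dict.contains_iff_mem_keys, hd2, PySem.Dict.keys_mk]
  -- ===== side A: one fresh insert per merged key =====
  have hA : ((merged.keys.foldl (fun d3 i =>
      if (d1.get? i).isNone then d3.insert i "added"
      else if (d2.get? i).isNone then d3.insert i "deleted"
      else d3.insert i (if d1.get? i == d2.get? i then "equal" else "changed"))
      (PySem.Dict.empty : PySem.Dict String String)).items)
      = merged.keys.map (fun i => (i, classify i)) := by
    rw [hbody]
    have := PySem.Dict.items_foldl_insert_fresh (l := merged.keys) (k := fun i => i)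
      (v := classify) (d := (PySem.Dict.empty : PySem.Dict String String))
      (by intro a _; exact PySem.Dict.contains_empty a) (by simpa using hndm)
    simpa using this
  -- ===== side B =====
  set res0 := merged.keys.foldl (fun d k => d.insert k "added")
      (PySem.Dict.empty : PySem.Dict String String) with hres0
  set res1 := dict1.foldl (fun d p => d.insert p.1 "deleted") res0 with hres1
  set filt := dict1.filter (fun p => d2.contains p.1) with hfilt
  set res2 := filt.foldl
      (fun d p => d.insert p.1 (if d1.get? p.1 == d2.get? p.1 then "equal" else "changed")) res1 with hres2
  -- keys are preserved through the two overwrite passes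
  have hk0 : res0.keys = merged.keys := by
    rw [hres0, PySem.Dict.keys_foldl_insert, PySem.Dict.keys_empty,
      PySem.Set.update_nil_left]
    exact PySem.Set.ofList_eq_self_of_nodup _ hndm
  have hupd : ∀ (xs : List String), (∀ x ∈ xs, x ∈ merged.keys) →
      PySem.Set.update merged.keys xs = merged.keys := by
    intro xs hsub
    rw [PySem.Set.update_eq_append_filter]
    have : (PySem.Set.ofList xs).filter (fun y => !(PySem.Set.contains merged.keys y)) = [] := by
      apply List.filter_eq_nil_iff.mpr
      intro y hy
      have : y ∈ merged.keys := hsub y ((PySem.List.mem_dedup _ _).mp hy)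
      simp [PySem.Set.contains_eq_listContains, this]
    rw [this, List.append_nil]
  have hk1 : res1.keys = merged.keys := by
    rw [hres1, PySem.Dict.keys_foldl_insert_key, hk0]
    exact hupd _ (fun x hx => (hmemm x).mpr (Or.inl hx))
  have hk2 : res2.keys = merged.keys := by
    rw [hres2, PySem.Dict.keys_foldl_insert_key, hk1]
    refine hupd _ (fun x hx => (hmemm x).mpr (Or.inl ?_))
    rcases List.mem_map.mp hx with ⟨p, hp, rfl⟩
    exact List.mem_map.mpr ⟨p, List.mem_of_mem_filter hp, rfl⟩
  -- getD through the three passes equals classify, on every merged key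
  have hget : ∀ k ∈ merged.keys, res2.getD k "" = classify k := by
    intro k hk
    have hg0 : res0.getD k "" = "added" := by
      have hitems : res0.items = merged.keys.map (fun i => (i, "added")) := by
        rw [hres0]
        have := PySem.Dict.items_foldl_insert_fresh (l := merged.keys) (k := fun i => i)
          (v := fun _ => "added") (d := (PySem.Dict.empty : PySem.Dict String String))
          (by intro a _; exact PySem.Dict.contains_empty a) (by simpa using hndm)
        simpa using this
      apply PySem.Dict.getD_of_mem_items
      · rw [hitems]; exact List.mem_map.mpr ⟨k, hk, rfl⟩
      · rw [hk0]; exact hndm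
    have hg1 := getD_foldl_insert_keyfun (fun _ => "deleted") dict1 res0 k
    have hg2 := getD_foldl_insert_keyfun
      (fun i => if d1.get? i == d2.get? i then "equal" else "changed") filt res1 k
    rw [hres2, hres1] at *
    by_cases hin1 : k ∈ dict1.map (fun p => p.1)
    · -- k is a key of dict1: d1.get? k is some
      have hd1s : ¬ (d1.get? k).isNone = true := by
        rw [Option.isNone_iff_eq_none, PySem.Dict.get?_eq_none_iff_contains]
        simp [hc1 k, hin1]
      by_cases hin2 : d2.contains k = true
      · -- common key: last pass wins
        have hkf : k ∈ filt.map (fun p => p.1) := by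
          rcases List.mem_map.mp hin1 with ⟨p, hp, rfl⟩
          exact List.mem_map.mpr ⟨p, List.mem_filter.mpr ⟨hp, by simpa using hin2⟩, rfl⟩
        rw [hg2, if_pos hkf, hcl]
        have : ¬ (d2.get? k).isNone = true := by
          rw [Option.isNone_iff_eq_none, PySem.Dict.get?_eq_none_iff_contains]
          simp [hin2]
        simp [hd1s, this]
      · -- in dict1 only: second pass wins, third pass never touches k
        have hkf : ¬ k ∈ filt.map (fun p => p.1) := by
          intro hkm
          rcases List.mem_map.mp hkm with ⟨p, hp, he⟩
          have := (List.mem_filter.mp hp).2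
          rw [he] at this
          simp [this] at hin2
        rw [hg2, if_neg hkf, hg1, if_pos hin1, hcl]
        have hd2n : (d2.get? k).isNone = true := by
          rw [Option.isNone_iff_eq_none, PySem.Dict.get?_eq_none_iff_contains]
          simpa using hin2
        simp [hd1s, hd2n]
    · -- key of dict2 only: first pass's 'added' survives
      have hkf : ¬ k ∈ filt.map (fun p => p.1) := by
        intro hkm
        rcases List.mem_map.mp hkm with ⟨p, hp, rfl⟩
        exact hin1 (List.mem_map.mpr ⟨p, List.mem_of_mem_filter hp, rfl⟩)
      rw [hg2, if_neg hkf, hg1, if_neg hin1, hg0, hcl]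
      have hd1n : (d1.get? k).isNone = true := by
        rw [Option.isNone_iff_eq_none, PySem.Dict.get?_eq_none_iff_contains]
        cases hcc : d1.contains k
        · rfl
        · exact absurd ((hc1 k).mp hcc) hin1
      simp [hd1n]
  -- assemble: both items lists are the canonical map over the merged keys
  have hB : res2.items = merged.keys.map (fun k => (k, classify k)) := by
    rw [PySem.Dict.items_eq_map_keys res2 (by rw [hk2]; exact hndm) "", hk2]
    exact List.map_congr_left (fun k hk => by rw [hget k hk])
  rw [hA, ← hB]
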